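-- pv_equiv track=rewrite | github.com/thaReal/MasterChef | codeforces/round_643/explorers.py | solve
-- ===== SOURCE A (Python) =====
-- from collections import Counter
--
-- def solve(n, e):
-- 	groups = 0
-- 	extras = 0
-- 	cntr = Counter(e)
--
-- 	levels = list(cntr.keys())
-- 	levels.sort()
-- 	for l in levels:
-- 		g = cntr[l] // l
-- 		groups += g
-- 		if cntr[l] % l != 0:
-- 			extra = cntr[l] % l
-- 			if extra + extras >= l:
-- 				groups += 1
-- 				extras = extra + extras - l
--
-- 			else:
-- 				extras += extra
--
-- 	return groups
-- ===== SOURCE B (Python) =====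
-- def solve(n, e):
--     groups = 0
--     extras = 0
--     remaining = list(e)
--     while remaining:
--         l = min(remaining)
--         rest = [x for x in remaining if x != l]
--         q, r = divmod(len(remaining) - len(rest), l)
--         if r and extras + r >= l:
--             groups += q + 1
--             extras += r - l
--         else:
--             groups += q
--             extras += r
--         remaining = rest
--     return groups
-- ===== Notes on version B (the rewrite author's own statement) =====
-- stated objective: alternative
-- what changed: Replaces A's Counter dictionary and sort of the distinct keys by selection-style extraction: B repeatedly takes min(remaining), removes that whole value class with a filter, reads its multiplicity off the length difference, and folds the remainder/carry branch into a single divmod-based update — no dict, no sorted(), a shrinking work list instead.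
import Mathlib
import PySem

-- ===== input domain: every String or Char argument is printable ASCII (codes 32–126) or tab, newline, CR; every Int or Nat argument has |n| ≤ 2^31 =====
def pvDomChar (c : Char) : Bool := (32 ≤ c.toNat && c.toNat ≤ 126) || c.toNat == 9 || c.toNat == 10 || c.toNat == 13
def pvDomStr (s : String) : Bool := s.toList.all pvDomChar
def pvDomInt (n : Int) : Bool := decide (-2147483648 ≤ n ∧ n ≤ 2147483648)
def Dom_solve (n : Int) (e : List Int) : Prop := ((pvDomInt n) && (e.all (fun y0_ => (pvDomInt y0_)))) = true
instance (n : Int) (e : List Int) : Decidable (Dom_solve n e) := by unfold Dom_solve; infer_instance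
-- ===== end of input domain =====

-- B drops the Counter and the sort: it repeatedly extracts the smallest remaining level with
-- min() and a filter, counting the extracted run by the length difference and folding the
-- carry branch into one divmod-based update (alternative algorithm; no speed claim).

-- ===== PORT A =====
def solve (n : Int) (e : List Int) : Int :=
  let cntr := PySem.Dict.counter e
  let levels := PySem.List.sorted (PySem.Dict.keys cntr) (fun x => x) false
  (levels.foldl (fun (st : Int × Int) l =>
      let g := PySem.Int.floordiv (cntr.getD l 0) l
      let groups := st.1 + g
      if PySem.Int.mod (cntr.getD l 0) l ≠ 0 then
        let extra := PySem.Int.mod (cntr.getD l 0) l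
        if extra + st.2 ≥ l then (groups + 1, extra + st.2 - l)
        else (groups, st.2 + extra)
      else (groups, st.2)) ((0 : Int), (0 : Int))).1

-- ===== PORT B =====
-- B's while-loop: min(remaining) (none = empty list = loop exit); divmod is ported as
-- (floordiv, mod), exact under Pre_ (Python raises ZeroDivisionError exactly when l = 0).
def solveAltLoop (rem : List Int) (groups extras : Int) : Int :=
  match h : PySem.List.min? rem (fun x => x) with
  | none => groups
  | some l =>
    let rest := rem.filter (fun x => x != l)
    let q := PySem.Int.floordiv ((rem.length : Int) - (rest.length : Int)) l
    let r := PySem.Int.mod ((rem.length : Int) - (rest.length : Int)) l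
    if r ≠ 0 ∧ extras + r ≥ l then solveAltLoop rest (groups + (q + 1)) (extras + (r - l))
    else solveAltLoop rest (groups + q) (extras + r)
termination_by rem.length
decreasing_by
  all_goals
    · have hlt : (rem.filter (fun x => x != l)).length < rem.length :=
        List.length_filter_lt_length_iff_exists.mpr ⟨l, PySem.List.min?_mem h, by simp⟩
      simpa using hlt

def solve_alt (n : Int) (e : List Int) : Int := solveAltLoop e 0 0

-- ===== PRECONDITION & SPEC =====
-- Pre_ excludes exactly the lists containing a 0 level: there A (cntr[0] // 0) and B
-- (divmod(m, 0)) both raise ZeroDivisionError.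
def Pre_solve (n : Int) (e : List Int) : Prop := (0 : Int) ∉ e
instance (n : Int) (e : List Int) : Decidable (Pre_solve n e) := by unfold Pre_solve; infer_instance
def pvWitness_solve : Int × List Int := (4, [1, 2, 2, 3])

def Spec_solve (n : Int) (e : List Int) (out : Int) : Prop := out = solve_alt n e
instance (n : Int) (e : List Int) (out : Int) : Decidable (Spec_solve n e out) := by unfold Spec_solve; infer_instance

-- ===== CLAIM (what is proved, stated in full; the proofs are below) =====
def Claim_equal_solve : Prop := ∀ (n : Int) (e : List Int), Dom_solve n e → Pre_solve n e → Spec_solve n e (solve n e)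

-- ===== LEMMAS AND PROOFS =====

-- A's loop body, abstracted over the count function.
def astep (cnt : Int → Int) (st : Int × Int) (l : Int) : Int × Int :=
  let g := PySem.Int.floordiv (cnt l) l
  let groups := st.1 + g
  if PySem.Int.mod (cnt l) l ≠ 0 then
    let extra := PySem.Int.mod (cnt l) l
    if extra + st.2 ≥ l then (groups + 1, extra + st.2 - l)
    else (groups, st.2 + extra)
  else (groups, st.2)

-- the length difference B computes is the multiplicity of the extracted level
lemma count_len_diff (rem : List Int) (l : Int) :
    (rem.length : Int) - ((rem.filter (fun x => x != l)).length : Int) = (rem.count l : Int) := by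
  have h1 : (rem.filter (fun x => x != l)).length = rem.countP (fun x => x != l) :=
    List.countP_eq_length_filter.symm
  have h2 : rem.length = rem.countP (fun x => x != l) + rem.countP (fun a => decide ¬((a != l) = true)) :=
    List.length_eq_countP_add_countP _
  have h3 : rem.countP (fun a => decide ¬((a != l) = true)) = rem.count l := by
    simp only [List.count]
    apply List.countP_congr
    intro a _
    simp
  omega

-- extracting the minimum: sorted(set(rem)) is the minimum followed by sorted(set(rest))
lemma sorted_min_cons (rem : List Int) (l : Int)
    (h : PySem.List.min? rem (fun x => x) = some l) :
    PySem.List.sorted (PySem.Set.ofList rem) (fun x => x) false =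
      l :: PySem.List.sorted (PySem.Set.ofList (rem.filter (fun x => x != l))) (fun x => x) false := by
  have hmem : l ∈ rem := PySem.List.min?_mem h
  have hmin : ∀ y ∈ rem, l ≤ y := PySem.List.min?_isMin h
  have htail : ∀ y, y ∈ PySem.List.sorted (PySem.Set.ofList (rem.filter (fun x => x != l))) (fun x => x) false ↔
      (y ∈ rem ∧ y ≠ l) := by
    intro y
    rw [PySem.List.mem_sorted, PySem.Set.mem_ofList, List.mem_filter]
    simp [bne]
  apply PySem.List.sorted_id_eq_of_perm_of_pairwise
  · refine (List.perm_ext_iff_of_nodup ?_ (PySem.Set.nodup_ofList rem)).mpr ?_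
    · refine List.nodup_cons.mpr ⟨fun hc => ?_, (PySem.List.sorted_ofList_pairwise_lt _).imp ne_of_lt⟩
      exact ((htail l).mp hc).2 rfl
    · intro a
      rw [List.mem_cons, htail a, PySem.Set.mem_ofList]
      constructor
      · rintro (rfl | ⟨ha, _⟩) <;> [exact hmem; exact ha]
      · intro ha
        by_cases hal : a = l
        · exact Or.inl hal
        · exact Or.inr ⟨ha, hal⟩
  · refine List.pairwise_cons.mpr ⟨fun y hy => ?_, ?_⟩
    · exact hmin y ((htail y).mp hy).1
    · exact PySem.List.sorted_pairwise _ _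

-- B's extraction loop computes A's fold over the sorted distinct levels
lemma loop_eq : ∀ (N : Nat) (rem : List Int), rem.length ≤ N → (0 : Int) ∉ rem → ∀ (g x : Int),
    solveAltLoop rem g x = ((PySem.List.sorted (PySem.Set.ofList rem) (fun y => y) false).foldl
      (astep (fun k => (rem.count k : Int))) (g, x)).1 := by
  intro N
  induction N with
  | zero =>
    intro rem hlen _ g x
    have : rem = [] := List.eq_nil_of_length_eq_zero (Nat.le_zero.mp hlen)
    subst this
    rw [solveAltLoop]
    rfl
  | succ N ih =>
    intro rem hlen h0 g x
    cases hminq : PySem.List.min? rem (fun y => y) with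
    | none =>
      have : rem = [] := (PySem.List.min?_eq_none_iff rem _).mp hminq
      subst this
      rw [solveAltLoop]
      rfl
    | some l =>
      have hmem : l ∈ rem := PySem.List.min?_mem hminq
      have hlne : l ≠ 0 := fun hc => h0 (hc ▸ hmem)
      have hrestlen : (rem.filter (fun x => x != l)).length < rem.length :=
        List.length_filter_lt_length_iff_exists.mpr ⟨l, hmem, by simp⟩
      have h0rest : (0 : Int) ∉ rem.filter (fun x => x != l) :=
        fun hc => h0 (List.mem_of_mem_filter hc)
      -- unfold one iteration of B
      rw [solveAltLoop]
      split
      · next heq => rw [heq] at hminq; exact absurd hminq (by simp)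
      · next l' heq =>
        rw [hminq] at heq
        have hleq : l = l' := Option.some.inj heq
        subst hleq
        simp only []
        -- unfold one step of A's fold
        rw [sorted_min_cons rem l hminq, List.foldl_cons]
        -- the remaining fold only reads counts of levels ≠ l, which filtering preserves
        rw [PySem.List.foldl_congr_mem _ _
              (astep (fun k => ((rem.filter (fun x => x != l)).count k : Int))) _
              (fun acc k hk => by
                have hkl : k ≠ l := by
                  have := (PySem.List.mem_sorted _ _ _ _).mp hk
                  rw [PySem.Set.mem_ofList, List.mem_filter] at this
                  simpa [bne] using this.2
                simp only [astep, List.count_filter (a := k) (l := rem) (p := fun x => x != l) (by simp [bne, hkl])])]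
        rw [count_len_diff rem l]
        -- align B's branch with A's step
        simp only [astep]
        set m : Int := (rem.count l : Int) with hm
        set q : Int := PySem.Int.floordiv m l
        set r : Int := PySem.Int.mod m l
        by_cases hr : r = 0
        · rw [if_neg (by simp [hr]), if_neg (by simp [hr]), hr, add_zero]
          exact ih _ (by omega) h0rest (g + q) x
        · by_cases hge : r + x ≥ l
          · rw [if_pos ⟨hr, by omega⟩, if_pos hr, if_pos hge,
                show g + (q + 1) = g + q + 1 by ring, show x + (r - l) = r + x - l by ring]
            exact ih _ (by omega) h0rest (g + q + 1) (r + x - l)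
          · rw [if_neg (fun hc => hge (by omega)), if_pos hr, if_neg hge,
                show x + r = x + r from rfl]
            exact ih _ (by omega) h0rest (g + q) (x + r)

-- port A, written through the abstract loop body
lemma solve_eq (n : Int) (e : List Int) :
    solve n e = ((PySem.List.sorted (PySem.Set.ofList e) (fun x => x) false).foldl
      (astep (fun l => (e.count l : Int))) (0, 0)).1 := by
  simp only [solve, PySem.Dict.keys_counter]
  congr 1
  congr 1
  funext st l
  simp [astep, PySem.Dict.getD_counter]

-- ===== VERDICT (by name: the statement is the Claim_ definition above) =====
theorem solve_spec : Claim_equal_solve := by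
  intro n e _ hpre
  unfold Spec_solve solve_alt
  rw [solve_eq]
  exact (loop_eq e.length e le_rfl hpre 0 0).symm
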